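-- pv_equiv track=rewrite | github.com/chainik1125/temp_xc | experiments/ward_backtracking_txc/plot/coherence.py | _max_repeat_run
-- ===== SOURCE A (Python) =====
-- def _max_repeat_run(toks: list[str]) -> int:
--     """Longest run of the *same* word repeated consecutively. A 'wait wait wait'
--     collapse goes to ~30+. Healthy text stays under ~3.
--     """
--     if not toks:
--         return 0
--     best = run = 1
--     for a, b in zip(toks, toks[1:]):
--         if a == b:
--             run += 1; best = max(best, run)
--         else:
--             run = 1
--     return best
-- ===== SOURCE B (Python) =====
-- def _max_repeat_run(toks: list[str]) -> int:
--     # Change-point formulation: find the positions where the word changes,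
--     # then the answer is the widest gap between consecutive boundaries.
--     n = len(toks)
--     cuts = [i for i, (a, b) in enumerate(zip(toks, toks[1:]), start=1) if a != b]
--     bounds = [0, *cuts, n]
--     return max((b - a for a, b in zip(bounds, bounds[1:])), default=0)
-- ===== Notes on version B (the rewrite author's own statement) =====
-- stated objective: alternative
-- what changed: Reformulates the problem as maximum gap between change points: a first pass collects the boundary indices where the word changes (plus 0 and n), and a second pass returns the widest distance between consecutive boundaries, instead of A's single running best/run counter.
import Mathlib
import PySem

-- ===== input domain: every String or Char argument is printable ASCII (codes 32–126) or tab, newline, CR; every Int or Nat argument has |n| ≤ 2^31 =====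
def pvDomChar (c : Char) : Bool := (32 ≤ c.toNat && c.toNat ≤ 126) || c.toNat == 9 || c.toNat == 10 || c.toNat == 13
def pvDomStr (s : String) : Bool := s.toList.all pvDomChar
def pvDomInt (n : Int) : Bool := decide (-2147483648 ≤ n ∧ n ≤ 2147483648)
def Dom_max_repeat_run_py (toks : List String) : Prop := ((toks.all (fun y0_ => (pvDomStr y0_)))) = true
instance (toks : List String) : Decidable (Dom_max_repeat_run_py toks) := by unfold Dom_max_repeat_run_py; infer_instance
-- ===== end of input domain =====

-- B reformulates the task as the widest gap between consecutive change points
-- (boundary indices where the word changes, plus 0 and n); objective: alternative.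


-- ===== PORT A =====
def max_repeat_run_py (toks : List String) : Int :=
  match toks with
  | [] => 0
  | _ :: _ =>
    ((toks.zip toks.tail).foldl
      (fun (s : Int × Int) (p : String × String) =>
        if p.1 == p.2 then (max s.1 (s.2 + 1), s.2 + 1) else (s.1, 1))
      (1, 1)).1

-- ===== PORT B =====
def max_repeat_run_py_alt (toks : List String) : Int :=
  let n : Int := toks.length
  let cuts : List Int :=
    ((PySem.List.enumerate (toks.zip toks.tail) 1).filter
      (fun p => !(p.2.1 == p.2.2))).map (fun p => p.1)
  let bounds : List Int := 0 :: (cuts ++ [n])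
  PySem.List.maxD ((bounds.zip bounds.tail).map (fun p => p.2 - p.1)) (fun x => x) 0

-- ===== PRECONDITION & SPEC =====
def Spec_max_repeat_run_py (toks : List String) (out : Int) : Prop := out = max_repeat_run_py_alt toks
instance (toks : List String) (out : Int) : Decidable (Spec_max_repeat_run_py toks out) := by unfold Spec_max_repeat_run_py; infer_instance

-- ===== CLAIM (what is proved, stated in full; the proofs are below) =====
def Claim_equal_max_repeat_run_py : Prop := ∀ (toks : List String), Dom_max_repeat_run_py toks → Spec_max_repeat_run_py toks (max_repeat_run_py toks)

-- ===== LEMMAS AND PROOFS =====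

-- A's loop, written as a recursion on the remaining tokens (proof helper)
def pvG : List String → String → Int → Int → Int
  | [], _, best, _ => best
  | y :: ys, x, best, run =>
    if x == y then pvG ys y (max best (run + 1)) (run + 1) else pvG ys y best 1

theorem pv_fold_eq_pvG : ∀ (xs : List String) (x : String) (best run : Int),
    (((x :: xs).zip xs).foldl
      (fun (s : Int × Int) (p : String × String) =>
        if p.1 == p.2 then (max s.1 (s.2 + 1), s.2 + 1) else (s.1, 1))
      (best, run)).1 = pvG xs x best run := by
  intro xs
  induction xs with
  | nil => intro x best run; simp [pvG]
  | cons y ys ih =>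
    intro x best run
    simp only [List.zip_cons_cons, List.foldl_cons, pvG]
    by_cases h : (x == y) = true
    · simp only [h, if_true]; exact ih y (max best (run + 1)) (run + 1)
    · simp only [h]; exact ih y best 1

-- maximal runs of consecutive equal words (proof-side characterisation)
def pvGroupRuns : List String → List (List String)
  | [] => []
  | x :: xs =>
    match pvGroupRuns xs with
    | [] => [[x]]
    | [] :: gs => [x] :: gs   -- unreachable: every group is nonempty
    | (y :: g) :: gs => if x == y then (x :: y :: g) :: gs else [x] :: (y :: g) :: gs

theorem pv_groupRuns_cons (x : String) (xs : List String) :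
    ∃ t gs, pvGroupRuns (x :: xs) = (x :: t) :: gs := by
  cases h : pvGroupRuns xs with
  | nil => exact ⟨[], [], by simp [pvGroupRuns, h]⟩
  | cons g gs =>
    cases g with
    | nil => exact ⟨[], gs, by simp [pvGroupRuns, h]⟩
    | cons y g' =>
      by_cases hxy : (x == y) = true
      · exact ⟨y :: g', gs, by simp [pvGroupRuns, h, hxy]⟩
      · exact ⟨[], (y :: g') :: gs, by simp [pvGroupRuns, h, hxy]⟩

theorem pv_foldl_max_congr (L : List Int) : ∀ (a b : Int), a = b →
    L.foldl max a = L.foldl max b := by intro a b h; rw [h]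

theorem pv_groupRuns_unfold (x y : String) (ys : List String) :
    pvGroupRuns (x :: y :: ys) =
      (match pvGroupRuns (y :: ys) with
       | [] => [[x]]
       | [] :: gs => [x] :: gs
       | (z :: g) :: gs => if x == z then (x :: z :: g) :: gs else [x] :: (z :: g) :: gs) := rfl

theorem pvG_eq : ∀ (xs : List String) (x : String) (best run : Int)
    (t : List String) (gs : List (List String)),
    pvGroupRuns (x :: xs) = (x :: t) :: gs → 1 ≤ run → run ≤ best →
    pvG xs x best run
      = (gs.map (fun g => (g.length : Int))).foldl max (max best (run + t.length)) := by
  intro xs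
  induction xs with
  | nil =>
    intro x best run t gs h h1 h2
    have h' : ([[x]] : List (List String)) = (x :: t) :: gs := h
    injection h' with h3 h4
    injection h3 with _ ht
    subst ht; subst h4
    simp only [pvG, List.map_nil, List.foldl_nil, List.length_nil]
    omega
  | cons y ys ih =>
    intro x best run t gs h h1 h2
    obtain ⟨t', gs', h'⟩ := pv_groupRuns_cons y ys
    rw [pv_groupRuns_unfold, h'] at h
    dsimp only at h
    by_cases hxy : (x == y) = true
    · rw [if_pos hxy] at h
      injection h with h3 h4
      injection h3 with _ ht
      subst ht; subst h4
      simp only [pvG, hxy, if_true]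
      rw [ih y (max best (run + 1)) (run + 1) t' gs' h' (by omega) (by omega)]
      apply pv_foldl_max_congr
      simp only [List.length_cons]
      push_cast
      omega
    · rw [if_neg hxy] at h
      injection h with h3 h4
      injection h3 with _ ht
      subst ht; subst h4
      simp only [pvG, hxy]
      rw [ih y best 1 t' gs' h' (by omega) (by omega)]
      simp only [List.map_cons, List.foldl_cons, List.length_nil, List.length_cons]
      apply pv_foldl_max_congr
      push_cast
      omega

-- the gap list of B's bounds equals the run-length list, for any offset k
theorem pvCuts_gaps : ∀ (xs : List String) (x : String) (k : Int),
    (let C : List Int :=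
      ((PySem.List.enumerate ((x :: xs).zip xs) (k + 1)).filter
        (fun p => !(p.2.1 == p.2.2))).map (fun p => p.1)
     let bounds : List Int := k :: (C ++ [k + ((x :: xs).length : Int)])
     (bounds.zip bounds.tail).map (fun p => p.2 - p.1))
      = (pvGroupRuns (x :: xs)).map (fun g => (g.length : Int)) := by
  intro xs
  induction xs with
  | nil =>
    intro x k
    simp [pvGroupRuns]
  | cons y ys ih =>
    intro x k
    obtain ⟨t', gs', h'⟩ := pv_groupRuns_cons y ys
    have hlen : k + 1 + (((y :: ys).length : Int)) = k + (((x :: y :: ys).length : Int)) := by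
      simp only [List.length_cons]; push_cast; omega
    by_cases hxy : (x == y) = true
    · -- no cut at k+1; the first gap grows by one
      have hIH := ih y (k + 1)
      simp only at hIH
      rw [hlen, h', List.map_cons] at hIH
      cases hC : (((PySem.List.enumerate ((y :: ys).zip ys) (k + 1 + 1)).filter
          (fun p => !(p.2.1 == p.2.2))).map (fun p => p.1))
          ++ [k + ((x :: y :: ys).length : Int)] with
      | nil => exact absurd hC (by simp)
      | cons r0 rt =>
        rw [hC] at hIH
        simp only [List.zip_cons_cons, List.tail_cons, List.map_cons] at hIH
        have hhead : r0 - (k + 1) = ((t'.length : Int) + 1) := (List.cons.injEq _ _ _ _ ▸ hIH).1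
        have htail := (List.cons.injEq _ _ _ _ ▸ hIH).2
        rw [pv_groupRuns_unfold, h']
        dsimp only
        rw [if_pos hxy]
        simp only [PySem.List.enumerate_cons, List.zip_cons_cons, List.filter_cons, hxy,
          Bool.not_true, Bool.false_eq_true, if_false, List.length_cons]
        simp only [List.length_cons] at hC
        rw [hC]
        simp only [List.tail_cons, List.zip_cons_cons, List.map_cons]
        refine List.cons_eq_cons.mpr ⟨by simp only [List.length_cons] at hhead ⊢; push_cast at hhead ⊢; omega, htail⟩
    · -- a cut at k+1; a fresh gap of width 1
      have hIH := ih y (k + 1)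
      simp only at hIH
      rw [hlen, h', List.map_cons] at hIH
      simp only [List.tail_cons, List.length_cons] at hIH
      rw [pv_groupRuns_unfold, h']
      dsimp only
      rw [if_neg hxy]
      simp only [PySem.List.enumerate_cons, List.zip_cons_cons, List.filter_cons, hxy,
        Bool.not_false, if_true, List.map_cons, List.cons_append, List.tail_cons,
        List.length_cons, List.length_nil]
      refine List.cons_eq_cons.mpr ⟨by push_cast; omega, ?_⟩
      exact hIH

-- ===== VERDICT (by name: the statement is the Claim_ definition above) =====
theorem max_repeat_run_py_spec : Claim_equal_max_repeat_run_py := by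
  intro toks _
  unfold Spec_max_repeat_run_py
  cases toks with
  | nil => rfl
  | cons x xs =>
    obtain ⟨t, gs, h⟩ := pv_groupRuns_cons x xs
    have hA : max_repeat_run_py (x :: xs) = pvG xs x 1 1 := by
      simp only [max_repeat_run_py, List.tail_cons]
      exact pv_fold_eq_pvG xs x 1 1
    rw [hA, pvG_eq xs x 1 1 t gs h le_rfl le_rfl]
    have hB := pvCuts_gaps xs x 0
    simp only [zero_add] at hB
    simp only [max_repeat_run_py_alt, List.tail_cons]
    simp only [List.tail_cons] at hB
    rw [hB, h]
    simp only [List.map_cons, List.length_cons, PySem.List.maxD]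
    rw [PySem.List.max?_id_cons]
    simp only [Option.getD_some]
    apply pv_foldl_max_congr
    push_cast
    omega
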